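-- pv_equiv track=rewrite | github.com/Exceed-Arthur/scrapeWikiMusicInfo | exceedLib.py | buildStringCombos
-- ===== SOURCE A (Python) =====
-- def buildStringCombos(string: str):
--     stringSplices = list()
--     for index in range(len(string)):
--         for index2 in range(len(string)):
--             if string[index:index2]:
--                 newString = string[index:index2 + 1]
--                 if newString not in stringSplices:
--                     stringSplices.append(newString)
--     strings = []
--     for i in range(0, len(stringSplices) - 1, 2):
--         strings.append(stringSplices[i + 1])
--         strings.append(stringSplices[i])
--     return strings
-- ===== SOURCE B (Python) =====
-- def buildStringCombos(string: str):
--     # One fused pass: dedup with a set, swap adjacent pairs on the fly via a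
--     # one-slot pending buffer (leftover pending is discarded, as A drops the
--     # last unpaired element).
--     seen = set()
--     strings = []
--     pending = None
--     n = len(string)
--     for index in range(n):
--         for index2 in range(n):
--             if string[index:index2]:
--                 newString = string[index:index2 + 1]
--                 if newString not in seen:
--                     seen.add(newString)
--                     if pending is None:
--                         pending = newString
--                     else:
--                         strings.append(newString)
--                         strings.append(pending)
--                         pending = None
--     return strings
-- ===== Notes on version B (the rewrite author's own statement) =====
-- stated objective: faster
-- what changed: Replaced A's ordered-list dedup (a linear 'not in' scan of the growing splice list per candidate substring) and its entire second index-swapping pass by one fused pass that dedups with a hash set and pairs-and-swaps on the fly through a one-slot pending buffer.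
import Mathlib
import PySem

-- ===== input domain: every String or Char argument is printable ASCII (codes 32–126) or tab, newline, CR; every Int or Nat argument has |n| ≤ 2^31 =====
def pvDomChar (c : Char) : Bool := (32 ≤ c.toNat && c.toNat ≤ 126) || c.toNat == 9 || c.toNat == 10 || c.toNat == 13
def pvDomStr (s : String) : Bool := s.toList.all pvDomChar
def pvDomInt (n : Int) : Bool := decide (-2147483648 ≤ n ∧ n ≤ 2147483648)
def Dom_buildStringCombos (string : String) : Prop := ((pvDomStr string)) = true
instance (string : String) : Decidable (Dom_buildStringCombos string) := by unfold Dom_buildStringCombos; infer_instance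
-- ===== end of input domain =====

-- B replaces A's ordered-list dedup (a linear `not in` scan per candidate) and the
-- whole second index-swapping pass by one fused pass with a hash set and a one-slot
-- pending buffer; same return value.

-- ===== PORT A =====
-- Literal transliteration of A: build the deduplicated splice list with nested
-- index loops, then a second pass over range(0, len-1, 2) swapping adjacent pairs.
-- The second pass indexes splices[i] / splices[i+1] with i ≤ len-2, always in
-- range, so the total pyGetD form is exact here.
def buildStringCombos (string : String) : List String :=
  let n := PySem.Str.len string
  let stringSplices : List String :=
    (PySem.List.pyRange 0 n 1).foldl (fun acc index =>
      (PySem.List.pyRange 0 n 1).foldl (fun acc index2 =>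
        if PySem.Str.slice string (some index) (some index2) ≠ "" then
          let newString := PySem.Str.slice string (some index) (some (index2 + 1))
          if newString ∈ acc then acc else acc ++ [newString]
        else acc) acc) []
  (PySem.List.pyRange 0 ((stringSplices.length : Int) - 1) 2).foldl (fun strings i =>
    (strings ++ [PySem.List.pyGetD stringSplices (i + 1) ""]) ++
      [PySem.List.pyGetD stringSplices i ""]) []

-- ===== PORT B =====
-- Literal transliteration of B: one fused pass; state = (seen set, pending, output).
def buildStringCombos_alt (string : String) : List String :=
  let n := PySem.Str.len string
  let st :=
    (PySem.List.pyRange 0 n 1).foldl (fun st index =>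
      (PySem.List.pyRange 0 n 1).foldl
        (fun (st : PySem.Set String × Option String × List String) index2 =>
          if PySem.Str.slice string (some index) (some index2) ≠ "" then
            let newString := PySem.Str.slice string (some index) (some (index2 + 1))
            if PySem.Set.contains st.1 newString then st
            else
              match st.2.1 with
              | none => (PySem.Set.add st.1 newString, some newString, st.2.2)
              | some p => (PySem.Set.add st.1 newString, none, st.2.2 ++ [newString, p])
          else st) st)
      ((PySem.Set.empty : PySem.Set String), (none : Option String), ([] : List String))
  st.2.2

-- ===== PRECONDITION & SPEC =====
def Spec_buildStringCombos (string : String) (out : List String) : Prop := out = buildStringCombos_alt string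
instance (string : String) (out : List String) : Decidable (Spec_buildStringCombos string out) := by unfold Spec_buildStringCombos; infer_instance

-- ===== CLAIM (what is proved, stated in full; the proofs are below) =====
def Claim_equal_buildStringCombos : Prop := ∀ (string : String), Dom_buildStringCombos string → Spec_buildStringCombos string (buildStringCombos string)

-- ===== LEMMAS AND PROOFS =====

-- A's second pass, as a recursive function: swap adjacent pairs, drop a leftover.
def pvPairSwap {α : Type} : List α → List α
  | a :: b :: t => b :: a :: pvPairSwap t
  | _ => []

theorem pvPairSwap_append_singleton {α : Type} (l : List α) (x : α)
    (h : l.length % 2 = 0) : pvPairSwap (l ++ [x]) = pvPairSwap l := by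
  induction l using pvPairSwap.induct with
  | case1 a b t ih =>
      simp only [List.length_cons] at h
      simp only [List.cons_append, pvPairSwap]
      rw [ih (by omega)]
  | case2 l h2 =>
      rcases l with _ | ⟨a, _ | ⟨b, t⟩⟩
      · rfl
      · simp at h
      · exact absurd rfl (h2 a b t)

theorem pvPairSwap_append_pair {α : Type} (l : List α) (p x : α)
    (h : l.length % 2 = 0) : pvPairSwap (l ++ [p, x]) = pvPairSwap l ++ [x, p] := by
  induction l using pvPairSwap.induct with
  | case1 a b t ih =>
      simp only [List.length_cons] at h
      simp only [List.cons_append, pvPairSwap]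
      rw [ih (by omega)]
  | case2 l h2 =>
      rcases l with _ | ⟨a, _ | ⟨b, t⟩⟩
      · rfl
      · simp at h
      · exact absurd rfl (h2 a b t)

theorem pvPyRange2_nil (a b : Int) (h : b ≤ a) : PySem.List.pyRange a b 2 = [] := by
  rw [PySem.List.pyRange_of_pos a b (by norm_num)]
  simp [if_neg (by omega : ¬ a < b)]

theorem pvPyRange2_cons (a b : Int) (h : a < b) :
    PySem.List.pyRange a b 2 = a :: PySem.List.pyRange (a + 2) b 2 := by
  rw [PySem.List.pyRange_of_pos a b (by norm_num),
      PySem.List.pyRange_of_pos (a + 2) b (by norm_num)]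
  have hn : (if a < b then ((b - a + 2 - 1) / 2).toNat else 0)
      = (if a + 2 < b then ((b - (a + 2) + 2 - 1) / 2).toNat else 0) + 1 := by
    split_ifs <;> omega
  rw [hn, List.range_succ_eq_map]
  simp only [List.map_cons, List.map_map]
  congr 1
  · norm_num
  · apply List.map_congr_left
    intro k _
    simp only [Function.comp_apply]
    push_cast
    ring

-- the simulation invariant between A's splice list and B's fused state
def pvInv (acc : List String) (st : PySem.Set String × Option String × List String) : Prop :=
  st.1 = acc ∧ acc.Nodup ∧ st.2.2 = pvPairSwap acc ∧
    st.2.1 = (if acc.length % 2 = 1 then acc.getLast? else none)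

theorem pvStep_sim (g : Prop) [Decidable g] (v : String) (acc : List String)
    (st : PySem.Set String × Option String × List String) (h : pvInv acc st) :
    pvInv (if g then (if v ∈ acc then acc else acc ++ [v]) else acc)
      (if g then
        (if PySem.Set.contains st.1 v then st
         else match st.2.1 with
           | none => (PySem.Set.add st.1 v, some v, st.2.2)
           | some p => (PySem.Set.add st.1 v, none, st.2.2 ++ [v, p]))
       else st) := by
  obtain ⟨h1, h2, h3, h4⟩ := h
  by_cases hg : g
  · simp only [if_pos hg]
    by_cases hv : v ∈ acc
    · have : PySem.Set.contains st.1 v = true := by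
        rw [PySem.Set.contains_iff, h1]; exact hv
      simp only [if_pos hv, this, if_pos]
      exact ⟨h1, h2, h3, h4⟩
    · have hc : ¬ PySem.Set.contains st.1 v = true := by
        rw [PySem.Set.contains_iff, h1]; exact hv
      simp only [if_neg hv, if_neg hc]
      have hadd : PySem.Set.add st.1 v = acc ++ [v] := by
        rw [h1]; exact PySem.Set.add_of_not_mem hv
      have hnodup : (acc ++ [v]).Nodup := by
        simp [List.nodup_append, h2]
        intro a ha hav
        exact hv (hav ▸ ha)
      rcases hp : st.2.1 with _ | p
      · -- pending empty ⇒ acc has even length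
        rw [hp] at h4
        have heven : acc.length % 2 = 0 := by
          rcases Nat.mod_two_eq_zero_or_one acc.length with h0 | h0
          · exact h0
          · rw [if_pos h0] at h4
            have hnil : acc = [] := List.getLast?_eq_none_iff.mp h4.symm
            subst hnil
            simp at h0
        refine ⟨hadd, hnodup, ?_, ?_⟩
        · rw [h3, pvPairSwap_append_singleton acc v heven]
        · have hodd' : (acc ++ [v]).length % 2 = 1 := by
            simp only [List.length_append, List.length_singleton]
            omega
          rw [if_pos hodd', List.getLast?_concat]
      · -- pending = some p ⇒ acc is odd, ending in p
        rw [hp] at h4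
        have hodd : acc.length % 2 = 1 := by
          by_contra hno
          rw [if_neg hno] at h4
          simp at h4
        have hlast : acc.getLast? = some p := by
          rw [if_pos hodd] at h4
          exact h4.symm
        obtain ⟨d, hd⟩ := List.getLast?_eq_some_iff.mp hlast
        have hdeven : d.length % 2 = 0 := by
          rw [hd] at hodd
          simp only [List.length_append, List.length_singleton] at hodd
          omega
        refine ⟨hadd, hnodup, ?_, ?_⟩
        · rw [h3, hd]
          calc pvPairSwap (d ++ [p]) ++ [v, p]
              = pvPairSwap d ++ [v, p] := by
                rw [pvPairSwap_append_singleton _ _ hdeven]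
            _ = pvPairSwap (d ++ [p, v]) := by
                rw [pvPairSwap_append_pair _ _ _ hdeven]
            _ = pvPairSwap ((d ++ [p]) ++ [v]) := by simp
        · have : ¬ (acc ++ [v]).length % 2 = 1 := by
            simp only [List.length_append, List.length_singleton]
            omega
          rw [if_neg this]
  · simp only [if_neg hg]
    exact ⟨h1, h2, h3, h4⟩

theorem pvInner_sim (string : String) (index : Int) (L : List Int)
    (acc : List String) (st : PySem.Set String × Option String × List String)
    (h : pvInv acc st) :
    pvInv
      (L.foldl (fun acc index2 =>
        if PySem.Str.slice string (some index) (some index2) ≠ "" then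
          let newString := PySem.Str.slice string (some index) (some (index2 + 1))
          if newString ∈ acc then acc else acc ++ [newString]
        else acc) acc)
      (L.foldl (fun (st : PySem.Set String × Option String × List String) index2 =>
        if PySem.Str.slice string (some index) (some index2) ≠ "" then
          let newString := PySem.Str.slice string (some index) (some (index2 + 1))
          if PySem.Set.contains st.1 newString then st
          else
            match st.2.1 with
            | none => (PySem.Set.add st.1 newString, some newString, st.2.2)
            | some p => (PySem.Set.add st.1 newString, none, st.2.2 ++ [newString, p])
        else st) st) := by
  induction L generalizing acc st with
  | nil => exact h
  | cons i L ih =>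
      exact ih _ _ (pvStep_sim _ _ _ _ h)

theorem pvOuter_sim (string : String) (R L : List Int)
    (acc : List String) (st : PySem.Set String × Option String × List String)
    (h : pvInv acc st) :
    pvInv
      (R.foldl (fun acc index =>
        L.foldl (fun acc index2 =>
          if PySem.Str.slice string (some index) (some index2) ≠ "" then
            let newString := PySem.Str.slice string (some index) (some (index2 + 1))
            if newString ∈ acc then acc else acc ++ [newString]
          else acc) acc) acc)
      (R.foldl (fun st index =>
        L.foldl (fun (st : PySem.Set String × Option String × List String) index2 =>
          if PySem.Str.slice string (some index) (some index2) ≠ "" then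
            let newString := PySem.Str.slice string (some index) (some (index2 + 1))
            if PySem.Set.contains st.1 newString then st
            else
              match st.2.1 with
              | none => (PySem.Set.add st.1 newString, some newString, st.2.2)
              | some p => (PySem.Set.add st.1 newString, none, st.2.2 ++ [newString, p])
          else st) st) st) := by
  induction R generalizing acc st with
  | nil => exact h
  | cons i R ih =>
      exact ih _ _ (pvInner_sim string i L acc st h)

-- A's second pass over range(0, len-1, 2) computes pvPairSwap
theorem pvPass2 (l pre init : List String) (hpre : pre.length % 2 = 0) :
    (PySem.List.pyRange (pre.length : Int) (((pre ++ l).length : Int) - 1) 2).foldl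
      (fun strings i =>
        (strings ++ [PySem.List.pyGetD (pre ++ l) (i + 1) ""]) ++
          [PySem.List.pyGetD (pre ++ l) i ""]) init
    = init ++ pvPairSwap l := by
  induction l using pvPairSwap.induct generalizing pre init with
  | case1 a b t ih =>
      have hlt : (pre.length : Int) < ((pre ++ a :: b :: t).length : Int) - 1 := by
        simp only [List.length_append, List.length_cons]
        push_cast
        omega
      rw [pvPyRange2_cons _ _ hlt]
      simp only [List.foldl_cons]
      have g1 : PySem.List.pyGetD (pre ++ a :: b :: t) ((pre.length : Int) + 1) "" = b := by
        have hcast : ((pre.length : Int) + 1) = (((pre.length + 1 : Nat)) : Int) := by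
          push_cast; ring
        rw [hcast, PySem.List.pyGetD_natCast]
        simp [List.getD_eq_getElem?_getD]
      have g0 : PySem.List.pyGetD (pre ++ a :: b :: t) ((pre.length : Int)) "" = a := by
        rw [PySem.List.pyGetD_natCast]
        simp [List.getD_eq_getElem?_getD]
      rw [g1, g0]
      have hre : pre ++ a :: b :: t = (pre ++ [a, b]) ++ t := by simp
      have hlen : (pre.length : Int) + 2 = (((pre ++ [a, b]).length : Nat) : Int) := by
        simp only [List.length_append, List.length_cons, List.length_nil]
        push_cast
        omega
      rw [hre, hlen, ih (pre ++ [a, b]) ((init ++ [b]) ++ [a])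
            (by simp only [List.length_append, List.length_cons, List.length_nil]; omega)]
      simp [pvPairSwap]
  | case2 l h2 =>
      rcases l with _ | ⟨a, _ | ⟨b, t⟩⟩
      · rw [pvPyRange2_nil _ _ (by simp)]
        simp [pvPairSwap]
      · rw [pvPyRange2_nil _ _ (by simp)]
        simp [pvPairSwap]
      · exact absurd rfl (h2 a b t)

-- ===== VERDICT (by name: the statement is the Claim_ definition above) =====
theorem buildStringCombos_spec : Claim_equal_buildStringCombos := by
  intro string _
  unfold Spec_buildStringCombos buildStringCombos buildStringCombos_alt
  simp only []
  have hsim := pvOuter_sim string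
    (PySem.List.pyRange 0 (PySem.Str.len string) 1)
    (PySem.List.pyRange 0 (PySem.Str.len string) 1)
    [] ((PySem.Set.empty : PySem.Set String), (none : Option String), ([] : List String))
    ⟨rfl, List.nodup_nil, rfl, rfl⟩
  obtain ⟨h1, h2, h3, h4⟩ := hsim
  rw [h3]
  have := pvPass2
    ((PySem.List.pyRange 0 (PySem.Str.len string) 1).foldl (fun acc index =>
      (PySem.List.pyRange 0 (PySem.Str.len string) 1).foldl (fun acc index2 =>
        if PySem.Str.slice string (some index) (some index2) ≠ "" then
          let newString := PySem.Str.slice string (some index) (some (index2 + 1))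
          if newString ∈ acc then acc else acc ++ [newString]
        else acc) acc) [])
    [] [] (by simp)
  simpa using this
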